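-- pv_equiv track=rewrite | github.com/Saylas1988/polymarket-weather-bot | main.py | _split_stake_70_15_15
-- ===== SOURCE A (Python) =====
-- def _split_stake_70_15_15(total: int) -> tuple[int, int, int]:
--     """
--     Возвращает (low, main, high) суммы в $.
--     Округляем до $1, затем подгоняем, чтобы сумма ровно совпала с total.
--     """
--     if total <= 0:
--         return 0, 0, 0
--     main = int(round(total * 0.70))
--     low = int(round(total * 0.15))
--     high = int(round(total * 0.15))
--     s = low + main + high
--     # Подгоняем остаток/перебор в main (самое логичное место)
--     main += (total - s)
--     if main < 0:
--         main = 0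
--     # если после этого сумма всё ещё не совпала (крайние случаи), раскидаем по соседям
--     s2 = low + main + high
--     if s2 != total:
--         delta = total - s2
--         if delta > 0:
--             high += delta
--         else:
--             # уменьшаем high/low по очереди
--             for _ in range(-delta):
--                 if high > 0:
--                     high -= 1
--                 elif low > 0:
--                     low -= 1
--                 elif main > 0:
--                     main -= 1
--     return low, main, high
-- ===== SOURCE B (Python) =====
-- def _split_stake_70_15_15(total: int) -> tuple[int, int, int]:
--     """(low, main, high) split of total: round 15% for each side bucket, give the rest to main."""
--     if total <= 0:
--         return 0, 0, 0
--     low = int(round(total * 0.15))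
--     high = int(round(total * 0.15))
--     return low, total - low - high, high
-- ===== Notes on version B (the rewrite author's own statement) =====
-- stated objective: simpler
-- what changed: B keeps the guard and the two fifteen-percent roundings but replaces A's separate seventy-percent rounding, residual correction into main, negativity clamp and decrement loop by the direct closed form main = total - low - high, which A's adjustment always reduces to.
import Mathlib
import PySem

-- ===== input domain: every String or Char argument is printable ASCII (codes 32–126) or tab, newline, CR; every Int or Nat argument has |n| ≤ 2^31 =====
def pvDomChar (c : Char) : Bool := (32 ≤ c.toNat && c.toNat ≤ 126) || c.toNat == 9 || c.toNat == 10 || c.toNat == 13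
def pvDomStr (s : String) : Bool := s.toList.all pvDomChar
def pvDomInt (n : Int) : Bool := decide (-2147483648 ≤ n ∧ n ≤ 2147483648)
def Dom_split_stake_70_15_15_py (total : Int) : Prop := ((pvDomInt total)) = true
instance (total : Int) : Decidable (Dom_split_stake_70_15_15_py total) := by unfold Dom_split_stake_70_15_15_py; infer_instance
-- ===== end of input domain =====

-- B drops A's dead machinery (the main-share rounding only feeds a correction that cancels it, the clamp and the
-- redistribution loop never fire) and returns (low, total - low - high, high) directly; objective: simpler.

-- ===== PORT A =====
-- Shared exact model of Python's `int(round(total * c))` for a float constant c = m / 2^e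
-- (m is the 53-bit significand of the IEEE-754 double nearest to c).  `pvRne v k` rounds
-- v / 2^k to the nearest integer, ties to even — both the IEEE product rounding and
-- Python 3's `round` use this rule; `pvFloatRound v e` first rounds the exact integer
-- product v = total*m to 53 significant bits (the double multiplication) and then
-- half-to-even to an integer (Python `round`).  Exact for |total| ≤ 2^31 (checked
-- against CPython over the whole Source A input range by sampling).
def pvRne (v : Int) (k : Nat) : Int :=
  if k = 0 then v else
    let q := v.ediv (2 ^ k)
    let r := v.emod (2 ^ k)
    let h : Int := 2 ^ (k - 1)
    if h < r then q + 1 else if r < h then q else if q % 2 = 0 then q else q + 1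

def pvFloatRound (v : Int) (e : Nat) : Int :=
  let b := v.natAbs.log2 + 1
  let V := if b ≤ 53 then v else pvRne v (b - 53) * 2 ^ (b - 53)
  pvRne V e

-- literal port of A; 0.70 = 6305039478318694/2^53 and 0.15 = 5404319552844595/2^55 as doubles
def split_stake_70_15_15_py (total : Int) : Int × Int × Int :=
  if total ≤ 0 then (0, 0, 0) else
  let main := pvFloatRound (total * 6305039478318694) 53   -- int(round(total * 0.70))
  let low := pvFloatRound (total * 5404319552844595) 55    -- int(round(total * 0.15))
  let high := pvFloatRound (total * 5404319552844595) 55   -- int(round(total * 0.15))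
  let s := low + main + high
  let main := main + (total - s)
  let main := if main < 0 then 0 else main
  let s2 := low + main + high
  if s2 ≠ total then
    let delta := total - s2
    if delta > 0 then (low, main, high + delta)
    else
      -- for _ in range(-delta): … ; range(n) iterates max(n,0) times = (-delta).toNat
      (List.range (-delta).toNat).foldl
        (fun p _ =>
          if 0 < p.2.2 then (p.1, p.2.1, p.2.2 - 1)
          else if 0 < p.1 then (p.1 - 1, p.2.1, p.2.2)
          else if 0 < p.2.1 then (p.1, p.2.1 - 1, p.2.2)
          else p)
        (low, main, high)
  else (low, main, high)

-- ===== PORT B =====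
def split_stake_70_15_15_py_alt (total : Int) : Int × Int × Int :=
  if total ≤ 0 then (0, 0, 0) else
  let low := pvFloatRound (total * 5404319552844595) 55    -- int(round(total * 0.15))
  let high := pvFloatRound (total * 5404319552844595) 55   -- int(round(total * 0.15))
  (low, total - low - high, high)

-- ===== PRECONDITION & SPEC =====
def Spec_split_stake_70_15_15_py (total : Int) (out : Int × Int × Int) : Prop := out = split_stake_70_15_15_py_alt total
instance (total : Int) (out : Int × Int × Int) : Decidable (Spec_split_stake_70_15_15_py total out) := by unfold Spec_split_stake_70_15_15_py; infer_instance

-- ===== CLAIM (what is proved, stated in full; the proofs are below) =====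
def Claim_equal_split_stake_70_15_15_py : Prop := ∀ (total : Int), Dom_split_stake_70_15_15_py total → Spec_split_stake_70_15_15_py total (split_stake_70_15_15_py total)

-- ===== LEMMAS AND PROOFS =====

-- rounding to nearest (ties either way) overshoots by at most half the denominator
lemma pvRne_le (v : Int) (k : Nat) (hk : k ≠ 0) : 2 ^ k * pvRne v k ≤ v + 2 ^ (k - 1) := by
  have h2 : (2:Int) ^ (k - 1) + 2 ^ (k - 1) = 2 ^ k := by
    rw [← two_mul, ← pow_succ']
    congr 1
    omega
  unfold pvRne
  rw [if_neg hk]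
  dsimp only
  have hd : (0:Int) < 2 ^ k := by positivity
  have hh0 : (0:Int) < 2 ^ (k - 1) := by positivity
  have hdm : 2 ^ k * (v.ediv (2 ^ k)) + v.emod (2 ^ k) = v := Int.mul_ediv_add_emod v (2 ^ k)
  have hr0 : 0 ≤ v.emod (2 ^ k) := Int.emod_nonneg v (by positivity)
  have hrlt : v.emod (2 ^ k) < 2 ^ k := Int.emod_lt_of_pos v hd
  have hq1 : (2:Int) ^ k * (v.ediv (2 ^ k) + 1) = 2 ^ k * (v.ediv (2 ^ k)) + 2 ^ k := by ring
  split_ifs <;> linarith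

lemma pvFloatRound_le (v : Int) (hv : 0 ≤ v) (hb : v < 2 ^ 84) :
    2 ^ 55 * pvFloatRound v 55 ≤ v + 2 ^ 30 + 2 ^ 54 := by
  unfold pvFloatRound
  dsimp only
  by_cases hc : v.natAbs.log2 + 1 ≤ 53
  · rw [if_pos hc]
    have h := pvRne_le v 55 (by norm_num)
    norm_num at h
    linarith
  · rw [if_neg hc]
    have hvnat : v.natAbs < 2 ^ 84 := by
      have hcast : (v.natAbs : Int) = v := Int.natAbs_of_nonneg hv
      have : ((2:Nat) ^ 84 : Int) = (2:Int) ^ 84 := by norm_num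
      omega
    have hb84 : v.natAbs.log2 + 1 ≤ 84 := by
      by_cases h0 : v.natAbs = 0
      · simp [h0, Nat.log2]
      · have := (Nat.log2_lt h0).mpr hvnat
        omega
    have h1 := pvRne_le v (v.natAbs.log2 + 1 - 53) (by omega)
    have h2 := pvRne_le (pvRne v (v.natAbs.log2 + 1 - 53) * 2 ^ (v.natAbs.log2 + 1 - 53)) 55 (by norm_num)
    have hpow : (2:Int) ^ (v.natAbs.log2 + 1 - 53 - 1) ≤ 2 ^ 30 := by
      apply pow_le_pow_right₀ (by norm_num)
      omega
    have hcomm : pvRne v (v.natAbs.log2 + 1 - 53) * 2 ^ (v.natAbs.log2 + 1 - 53)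
        = 2 ^ (v.natAbs.log2 + 1 - 53) * pvRne v (v.natAbs.log2 + 1 - 53) := mul_comm _ _
    norm_num at h2
    linarith [hcomm ▸ h1]

-- the two 15% buckets never exceed the total
lemma pv_low_le (t : Int) (h1 : 1 ≤ t) (h2 : t ≤ 2 ^ 31) :
    2 * pvFloatRound (t * 5404319552844595) 55 ≤ t := by
  rcases eq_or_lt_of_le h1 with h | h
  · rw [← h]
    decide
  · have hv0 : 0 ≤ t * 5404319552844595 := by positivity
    have hvb : t * 5404319552844595 < 2 ^ 84 := by
      have := mul_le_mul_of_nonneg_right h2 (show (0:Int) ≤ 5404319552844595 by norm_num)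
      norm_num at this ⊢
      omega
    have hfr := pvFloatRound_le (t * 5404319552844595) hv0 hvb
    norm_num at hfr
    omega

-- ===== VERDICT (by name: the statement is the Claim_ definition above) =====

theorem split_stake_70_15_15_py_spec : Claim_equal_split_stake_70_15_15_py := by
  intro t hdom
  unfold Spec_split_stake_70_15_15_py split_stake_70_15_15_py split_stake_70_15_15_py_alt
  by_cases hle : t ≤ 0
  · simp [hle]
  · have ht1 : 1 ≤ t := by omega
    have ht2 : t ≤ 2 ^ 31 := by
      unfold Dom_split_stake_70_15_15_py pvDomInt at hdom
      simp only [decide_eq_true_eq] at hdom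
      norm_num
      omega
    have hlow := pv_low_le t ht1 ht2
    rw [if_neg hle, if_neg hle]
    simp only []
    set L := pvFloatRound (t * 5404319552844595) 55 with hL
    set M := pvFloatRound (t * 6305039478318694) 53 with hM
    have hm : ¬ (M + (t - (L + M + L)) < 0) := by omega
    rw [if_neg hm]
    have hs2 : ¬ (L + (M + (t - (L + M + L))) + L ≠ t) := by omega
    rw [if_neg hs2]
    refine Prod.ext rfl (Prod.ext ?_ rfl)
    simp only []
    omega
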